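-- pv_equiv track=rewrite | github.com/lukem2020/In-Silico-Peptide-Design-Activation-Pipeline | src/design_library.py | mutate_positions
-- ===== SOURCE A (Python) =====
-- from typing import Dict, Iterable, List, Sequence, Tuple
--
-- def mutate_positions(
--     parent_seq: str,
--     mutations: Dict[int, str],
-- ) -> str:
--     """
--     Return a new sequence where specific (1-based) positions are mutated.
--
--     Parameters
--     ----------
--     parent_seq:
--         Original amino-acid sequence.
--     mutations:
--         Dictionary mapping 1-based positions -> single-letter residue code.
--
--     Notes
--     -----
--     - Positions are 1-based to align with typical biochemical numbering.
--     - No validation is done on the amino-acid alphabet.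
--     """
--     seq_list = list(parent_seq)
--     for pos_1b, aa in mutations.items():
--         idx = pos_1b - 1
--         if idx < 0 or idx >= len(seq_list):
--             raise ValueError(f"Mutation position {pos_1b} out of range for length {len(seq_list)}")
--         seq_list[idx] = aa
--     return "".join(seq_list)
-- ===== SOURCE B (Python) =====
-- def mutate_positions(parent_seq, mutations):
--     n = len(parent_seq)
--     for pos_1b in mutations:
--         if pos_1b < 1 or pos_1b > n:
--             raise ValueError(f"Mutation position {pos_1b} out of range for length {n}")
--     return "".join(mutations.get(i + 1, c) for i, c in enumerate(parent_seq))
-- ===== Notes on version B (the rewrite author's own statement) =====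
-- stated objective: alternative
-- what changed: A copies the sequence into a list and destructively writes each mutation into it by index; B first validates all positions, then rebuilds the string in a single pass over the sequence, looking each 1-based position up in the dict with get.
import Mathlib
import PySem

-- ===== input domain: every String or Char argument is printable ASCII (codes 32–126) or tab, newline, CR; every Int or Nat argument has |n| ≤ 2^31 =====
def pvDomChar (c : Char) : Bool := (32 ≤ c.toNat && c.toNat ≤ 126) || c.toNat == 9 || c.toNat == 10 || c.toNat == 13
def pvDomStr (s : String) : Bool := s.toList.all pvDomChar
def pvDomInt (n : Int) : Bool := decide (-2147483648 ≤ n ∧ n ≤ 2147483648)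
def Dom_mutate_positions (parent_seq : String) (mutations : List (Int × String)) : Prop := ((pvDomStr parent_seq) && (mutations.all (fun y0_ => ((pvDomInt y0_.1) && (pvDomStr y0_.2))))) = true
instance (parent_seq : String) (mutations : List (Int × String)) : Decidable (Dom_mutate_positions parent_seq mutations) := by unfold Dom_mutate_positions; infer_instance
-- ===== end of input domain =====

-- ===== PORT A =====
-- B changes the decomposition: A writes mutations into a mutable copy of the sequence;
-- B validates first, then rebuilds the string by looking each position up in the dict.
-- A raises ValueError on out-of-range positions; those inputs (and assoc lists with
-- duplicate keys, which no Python dict can represent) are outside Pre_.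

-- the loop 'for pos_1b, aa in mutations.items(): … seq_list[idx] = aa' (none = ValueError)
def mutAGo (xs : List String) (ms : List (Int × String)) : Option (List String) :=
  match ms with
  | [] => some xs
  | (p, aa) :: rest =>
    let idx : Int := p - 1
    if idx < 0 ∨ idx ≥ (xs.length : Int) then none
    else mutAGo (xs.set idx.toNat aa) rest

def mutate_positions (parent_seq : String) (mutations : List (Int × String)) : String :=
  let seqList := parent_seq.toList.map (fun c => String.ofList [c])
  match mutAGo seqList mutations with
  | some l => PySem.Str.join "" l
  | none => ""   -- unreachable under Pre_ (Python raises ValueError here)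

-- ===== PORT B =====
def mutate_positions_alt (parent_seq : String) (mutations : List (Int × String)) : String :=
  let n : Int := (parent_seq.toList.length : Int)
  if mutations.all (fun pr => decide (1 ≤ pr.1) && decide (pr.1 ≤ n)) then
    PySem.Str.join "" ((PySem.List.enumerate parent_seq.toList).map
      (fun ic => (PySem.Dict.mk mutations).getD (ic.1 + 1) (String.ofList [ic.2])))
  else ""   -- unreachable under Pre_ (Python raises ValueError here)

-- ===== PRECONDITION & SPEC =====
-- Pre_ excludes inputs where A raises ValueError (a position outside 1..len) and association
-- lists with duplicate keys, which a Python dict cannot represent (the two ports then make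
-- equally defensible first-match vs last-match choices).
def Pre_mutate_positions (parent_seq : String) (mutations : List (Int × String)) : Prop :=
  (mutations.map Prod.fst).Nodup ∧
  ∀ pr ∈ mutations, 1 ≤ pr.1 ∧ pr.1 ≤ (parent_seq.toList.length : Int)
instance (parent_seq : String) (mutations : List (Int × String)) : Decidable (Pre_mutate_positions parent_seq mutations) := by unfold Pre_mutate_positions; infer_instance

def pvWitness_mutate_positions : String × (List (Int × String)) := ("PEPTIDE", [(2, "A"), (5, "G")])

def Spec_mutate_positions (parent_seq : String) (mutations : List (Int × String)) (out : String) : Prop := out = mutate_positions_alt parent_seq mutations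
instance (parent_seq : String) (mutations : List (Int × String)) (out : String) : Decidable (Spec_mutate_positions parent_seq mutations out) := by unfold Spec_mutate_positions; infer_instance

-- ===== CLAIM (what is proved, stated in full; the proofs are below) =====
def Claim_equal_mutate_positions : Prop := ∀ (parent_seq : String) (mutations : List (Int × String)), Dom_mutate_positions parent_seq mutations → Pre_mutate_positions parent_seq mutations → Spec_mutate_positions parent_seq mutations (mutate_positions parent_seq mutations)

-- ===== LEMMAS AND PROOFS =====
lemma get?_mk_eq_none {v : Type} (ms : List (Int × v)) (k : Int) (h : k ∉ ms.map Prod.fst) :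
    (PySem.Dict.mk ms).get? k = none := by
  induction ms with
  | nil => rfl
  | cons hd tl ih =>
    rw [PySem.Dict.get?_mk_cons]
    simp only [List.map_cons, List.mem_cons] at h
    rw [not_or] at h
    simp [Ne.symm h.1, ih h.2]

lemma mutAGo_eq (ms : List (Int × String)) (xs : List String)
    (hnd : (ms.map Prod.fst).Nodup)
    (hin : ∀ pr ∈ ms, 1 ≤ pr.1 ∧ pr.1 ≤ (xs.length : Int)) :
    mutAGo xs ms = some ((List.range xs.length).map
      (fun (i : Nat) => (PySem.Dict.mk ms).getD ((i : Int) + 1) (xs.getD i ""))) := by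
  induction ms generalizing xs with
  | nil =>
    unfold mutAGo
    congr 1
    have h0 : ∀ i : Nat, (PySem.Dict.mk ([] : List (Int × String))).getD ((i : Int) + 1) (xs.getD i "") = xs.getD i "" := fun i => rfl
    apply List.ext_getElem
    · simp
    · intro n h1 h2
      simp only [List.getElem_map, List.getElem_range, h0]
      exact (List.getD_eq_getElem _ _ h1).symm
  | cons hd tl ih =>
    obtain ⟨p, aa⟩ := hd
    have hp := hin (p, aa) (List.mem_cons_self)
    have hplo : (1 : Int) ≤ p := hp.1
    have hphi : p ≤ (xs.length : Int) := hp.2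
    simp only [List.map_cons, List.nodup_cons] at hnd
    unfold mutAGo
    have hcond : ¬ (p - 1 < 0 ∨ p - 1 ≥ (xs.length : Int)) := by omega
    simp only [hcond, if_false]
    rw [ih (xs.set (p - 1).toNat aa) hnd.2
      (fun pr hpr => by simpa [List.length_set] using hin pr (List.mem_cons_of_mem _ hpr))]
    congr 1
    simp only [List.length_set]
    refine List.map_congr_left (fun i hi => ?_)
    have hilt : i < xs.length := List.mem_range.mp hi
    rw [PySem.Dict.getD_eq_get?_getD, PySem.Dict.getD_eq_get?_getD,
        PySem.Dict.get?_mk_cons]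
    by_cases hip : p = (i : Int) + 1
    · have hji : (p - 1).toNat = i := by omega
      have hnone : (PySem.Dict.mk tl).get? ((i : Int) + 1) = none := by
        apply get?_mk_eq_none
        rw [← hip]
        exact hnd.1
      simp [hip, hnone, List.getElem_set_self, hilt]
    · have hji : (p - 1).toNat ≠ i := by omega
      have hbeq : (p == (i : Int) + 1) = false := by simp [hip]
      simp only [hbeq, Bool.false_eq_true, if_false]
      congr 1
      rw [List.getD_eq_getElem _ _ (by simpa using hilt), List.getD_eq_getElem _ _ hilt]
      exact List.getElem_set_ne hji (by simpa using hilt)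

lemma enum_map_eq {b : Type} (l : List Char) (s : Int) (g : Int -> Char -> b) :
    (PySem.List.enumerate l s).map (fun ic => g ic.1 ic.2)
      = (List.range l.length).map (fun (i : Nat) => g (s + (i : Int)) (l.getD i ' ')) := by
  induction l generalizing s with
  | nil => rfl
  | cons x xs ih =>
    rw [PySem.List.enumerate_cons, List.map_cons, ih (s + 1)]
    rw [List.length_cons, List.range_succ_eq_map, List.map_cons, List.map_map]
    simp only [Nat.cast_zero, add_zero, List.getD_cons_zero]
    congr 1
    refine List.map_congr_left (fun i hi => ?_)
    simp only [Function.comp_apply, List.getD_cons_succ]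
    push_cast
    ring_nf

-- ===== VERDICT (by name: the statement is the Claim_ definition above) =====
theorem mutate_positions_spec : Claim_equal_mutate_positions := by
  intro ps ms _ hpre
  unfold Spec_mutate_positions mutate_positions mutate_positions_alt
  obtain ⟨hnd, hin⟩ := hpre
  have hall : ms.all (fun pr => decide (1 ≤ pr.1) && decide (pr.1 ≤ (ps.toList.length : Int))) = true := by
    rw [List.all_eq_true]
    intro pr hpr
    have := hin pr hpr
    have h2 : pr.1 ≤ ((ps.length : Nat) : Int) := by simpa using this.2
    simp [this.1, h2]
  simp only [hall, if_pos]
  rw [mutAGo_eq ms (ps.toList.map (fun c => String.ofList [c])) hnd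
    (fun pr hpr => by simpa using hin pr hpr)]
  rw [enum_map_eq ps.toList 0 (fun i c => (PySem.Dict.mk ms).getD (i + 1) (String.ofList [c]))]
  refine congrArg (PySem.Str.join "") ?_
  rw [List.length_map]
  refine List.map_congr_left (fun i hi => ?_)
  have hilt : i < ps.toList.length := List.mem_range.mp hi
  have hsing : (ps.toList.map (fun c => String.ofList [c])).getD i "" = String.ofList [ps.toList.getD i ' '] := by
    rw [List.getD_eq_getElem _ _ (by simpa using hilt), List.getD_eq_getElem _ _ hilt]
    simp
  rw [hsing, zero_add]
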